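-- pv_equiv track=rewrite | github.com/Seunghwa-Han/School | Coding Test/programmers/프렌즈4블록.py | find2x2
-- ===== SOURCE A (Python) =====
-- def find2x2(m,n,b):
--     flag = False
-- 	# 4block찾기
--     tmp = [[b[i][j] for j in range(n)] for i in range(m)]
--     for i in range(m-1):
--         for j in range(n-1):
--             if b[i][j]=='.': continue
--             if b[i][j]==b[i][j+1]==b[i+1][j]==b[i+1][j+1]:
--                 flag = True
--                 tmp[i][j]='.'
--                 tmp[i+1][j]='.'
--                 tmp[i][j+1]='.'
--                 tmp[i+1][j+1]='.'
-- 	# 아래로 밀기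
--     st = []
--     for j in range(n):
--         for i in range(m):
--             if tmp[i][j]!='.':
--                 st.append((i,j))
--         i = m-1
--         while st:
--             x,y = st.pop()
--             b[i][j] = b[x][y]
--             i -= 1
--         while i>=0:
--             b[i][j]='.'
--             i -= 1
--     return flag
-- ===== SOURCE B (Python) =====
-- def find2x2(m, n, b):
--     # Phase 1: collect all 2x2 match anchors by comprehension, derive the marked cells.
--     matches = [(i, j) for i in range(m - 1) for j in range(n - 1)
--                if b[i][j] != '.' and b[i][j] == b[i][j + 1] == b[i + 1][j] == b[i + 1][j + 1]]
--     marked = {(i + di, j + dj) for (i, j) in matches for di in (0, 1) for dj in (0, 1)}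
--     # Phase 2: two-pointer bottom-aligned compaction per column (no explicit stack).
--     for j in range(n):
--         write = m - 1
--         for read in range(m - 1, -1, -1):
--             if b[read][j] != '.' and (read, j) not in marked:
--                 b[write][j] = b[read][j]
--                 write -= 1
--         while write >= 0:
--             b[write][j] = '.'
--             write -= 1
--     return bool(matches)
-- ===== Notes on version B (the rewrite author's own statement) =====
-- stated objective: alternative
-- what changed: B collects the 2x2 matches with a comprehension into a list and a marked set instead of punching '.' into a grid copy, compacts each column bottom-up with a two-pointer read/write pass instead of A's explicit stack of surviving coordinates, and returns bool(matches) instead of an incrementally updated flag; the in-place mutation of b is identical.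
import Mathlib
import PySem

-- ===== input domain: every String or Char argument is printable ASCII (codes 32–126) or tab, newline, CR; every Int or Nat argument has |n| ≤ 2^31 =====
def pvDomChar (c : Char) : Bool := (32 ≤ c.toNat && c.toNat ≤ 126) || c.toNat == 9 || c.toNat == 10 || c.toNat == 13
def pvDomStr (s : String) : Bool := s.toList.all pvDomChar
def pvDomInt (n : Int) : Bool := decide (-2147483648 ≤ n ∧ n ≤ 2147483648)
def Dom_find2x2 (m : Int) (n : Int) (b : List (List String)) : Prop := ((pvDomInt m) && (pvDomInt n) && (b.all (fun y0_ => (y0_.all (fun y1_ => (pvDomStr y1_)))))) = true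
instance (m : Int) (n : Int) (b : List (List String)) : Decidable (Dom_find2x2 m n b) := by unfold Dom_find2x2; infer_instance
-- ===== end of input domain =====

-- B replaces A's mark-a-'.'-copy + explicit-stack compaction by a match comprehension, a marked set
-- and a two-pointer per-column compaction (objective: alternative decomposition, same cost).
-- Both Pythons mutate b in place identically; the equivalence proved here is about the RETURN value
-- (the flag), which both compute from the original, unmutated grid.

-- ===== PORT A =====
-- b[i][j], total via defaults; all accesses made by either port are in range under Pre_find2x2
def cellAt (b : List (List String)) (i j : Int) : String :=
  PySem.List.pyGetD (PySem.List.pyGetD b i []) j ""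

-- Transliteration of A's flag computation (the double loop with 'continue' and the 4-way equality).
-- A's tmp marking and its stack-based phase 2 only mutate b in place and never feed the returned
-- flag, which is invisible in this signature (see header line).
def find2x2 (m : Int) (n : Int) (b : List (List String)) : Bool :=
  (PySem.List.pyRange 0 (m - 1) 1).foldl (fun flag i =>
    (PySem.List.pyRange 0 (n - 1) 1).foldl (fun flag j =>
      if cellAt b i j = "." then flag
      else if cellAt b i j = cellAt b i (j + 1) ∧ cellAt b i j = cellAt b (i + 1) j ∧
               cellAt b i j = cellAt b (i + 1) (j + 1) then true
      else flag) flag) false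

-- ===== PORT B =====
-- B's comprehension filter condition
def isMatch (b : List (List String)) (i j : Int) : Bool :=
  decide (cellAt b i j ≠ "." ∧ cellAt b i j = cellAt b i (j + 1) ∧
          cellAt b i j = cellAt b (i + 1) j ∧ cellAt b i j = cellAt b (i + 1) (j + 1))

-- Transliteration of B: the 'matches' comprehension and 'bool(matches)'. B's marked set and its
-- two-pointer phase 2 only mutate b in place and never feed the returned value (see header line).
def find2x2_alt (m : Int) (n : Int) (b : List (List String)) : Bool :=
  let ms :=
    (PySem.List.pyRange 0 (m - 1) 1).flatMap (fun i =>
      ((PySem.List.pyRange 0 (n - 1) 1).filter (fun j => isMatch b i j)).map (fun j => (i, j)))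
  !ms.isEmpty

-- ===== PRECONDITION & SPEC =====
-- Exactly the inputs where Python A returns normally: for n ≤ 0 A touches no cell at all; for
-- n ≥ 1 every access is b[i][j] with 0 ≤ i < m, 0 ≤ j < n, so A raises IndexError iff m > len(b)
-- or one of the first m rows is shorter than n.
def Pre_find2x2 (m : Int) (n : Int) (b : List (List String)) : Prop :=
  n ≤ 0 ∨ (m ≤ (b.length : Int) ∧ ∀ row ∈ b.take m.toNat, n ≤ (row.length : Int))
instance (m : Int) (n : Int) (b : List (List String)) : Decidable (Pre_find2x2 m n b) := by
  unfold Pre_find2x2; infer_instance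
def pvWitness_find2x2 : Int × Int × List (List String) := (2, 2, [["a", "a"], ["a", "a"]])

def Spec_find2x2 (m : Int) (n : Int) (b : List (List String)) (out : Bool) : Prop := out = find2x2_alt m n b
instance (m : Int) (n : Int) (b : List (List String)) (out : Bool) : Decidable (Spec_find2x2 m n b out) := by unfold Spec_find2x2; infer_instance

-- ===== CLAIM (what is proved, stated in full; the proofs are below) =====
def Claim_equal_find2x2 : Prop := ∀ (m : Int) (n : Int) (b : List (List String)), Dom_find2x2 m n b → Pre_find2x2 m n b → Spec_find2x2 m n b (find2x2 m n b)

-- ===== LEMMAS AND PROOFS =====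

-- A's inner if-chain is an or with the match test
theorem stepA_eq (b : List (List String)) (i j : Int) (fl : Bool) :
    (if cellAt b i j = "." then fl
     else if cellAt b i j = cellAt b i (j + 1) ∧ cellAt b i j = cellAt b (i + 1) j ∧
              cellAt b i j = cellAt b (i + 1) (j + 1) then true
     else fl) = (fl || isMatch b i j) := by
  by_cases h1 : cellAt b i j = "."
  · have hm : isMatch b i j = false := by
      unfold isMatch; exact decide_eq_false (fun h => h.1 h1)
    rw [if_pos h1, hm, Bool.or_false]
  · by_cases h2 : cellAt b i j = cellAt b i (j + 1) ∧ cellAt b i j = cellAt b (i + 1) j ∧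
        cellAt b i j = cellAt b (i + 1) (j + 1)
    · have hm : isMatch b i j = true := by
        unfold isMatch; exact decide_eq_true ⟨h1, h2⟩
      rw [if_neg h1, if_pos h2, hm, Bool.or_true]
    · have hm : isMatch b i j = false := by
        unfold isMatch; exact decide_eq_false (fun h => h2 h.2)
      rw [if_neg h1, if_neg h2, hm, Bool.or_false]

theorem foldl_or_any (p : Int → Bool) (l : List Int) (fl : Bool) :
    l.foldl (fun a x => a || p x) fl = (fl || l.any p) := by
  induction l generalizing fl with
  | nil => simp
  | cons x xs ih => simp [List.foldl_cons, ih, Bool.or_assoc]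

theorem innerA_eq (b : List (List String)) (i : Int) (l : List Int) (fl : Bool) :
    l.foldl (fun flag j =>
      if cellAt b i j = "." then flag
      else if cellAt b i j = cellAt b i (j + 1) ∧ cellAt b i j = cellAt b (i + 1) j ∧
               cellAt b i j = cellAt b (i + 1) (j + 1) then true
      else flag) fl = (fl || l.any (isMatch b i)) := by
  induction l generalizing fl with
  | nil => simp
  | cons j js ih => rw [List.foldl_cons, stepA_eq, ih, List.any_cons, Bool.or_assoc]

theorem isEmpty_flatMap {α β : Type} (f : α → List β) (l : List α) :
    (l.flatMap f).isEmpty = l.all (fun x => (f x).isEmpty) := by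
  induction l with
  | nil => simp
  | cons x xs ih => cases hfx : f x <;> simp [List.flatMap_cons, hfx, ih]

theorem isEmpty_filter (p : Int → Bool) (l : List Int) :
    (l.filter p).isEmpty = !l.any p := by
  induction l with
  | nil => simp
  | cons x xs ih => by_cases h : p x = true <;> simp [h, ih]

-- ===== VERDICT (by name: the statement is the Claim_ definition above) =====
theorem find2x2_spec : Claim_equal_find2x2 := by
  intro m n b _ _
  unfold Spec_find2x2 find2x2 find2x2_alt
  rw [show (fun flag i =>
      (PySem.List.pyRange 0 (n - 1) 1).foldl (fun flag j =>
        if cellAt b i j = "." then flag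
        else if cellAt b i j = cellAt b i (j + 1) ∧ cellAt b i j = cellAt b (i + 1) j ∧
                 cellAt b i j = cellAt b (i + 1) (j + 1) then true
        else flag) flag) = (fun flag i => flag || (PySem.List.pyRange 0 (n - 1) 1).any (isMatch b i))
    from funext fun fl => funext fun i => innerA_eq b i _ fl]
  rw [foldl_or_any]
  simp [isEmpty_flatMap, isEmpty_filter, List.all_eq_not_any_not]
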